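-- pv_equiv track=rewrite | github.com/gprothia2/TextractonECR | main/EulerEye-master3/src/mask_to_bbox.py | label_components
-- ===== SOURCE A (Python) =====
-- def label_components(image):
--     w, h = len(image), len(image[0])
--     labels = [[0 for _ in range(h)] for _ in range(w)]
--     visited = [[0 for _ in range(h)] for _ in range(w)]
--
--     dx = [1, 0, -1, 0]
--     dy = [0, 1, 0, -1]
--
--     cnt = 0
--     # loop over all un-visited foreground pixels
--     for x in range(w):
--         for y in range(h):
--             if image[x][y] == 1 and visited[x][y] == 0:
--                 visited[x][y] = 1
--                 cnt += 1
--                 # BFS: Start flooding from (x,y)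
--                 queue = [(x, y)]
--                 labels[x][y] = cnt
--                 while queue:
--                     (qx, qy) = queue.pop(0)
--                     for i in range(4):
--                         nx, ny = qx + dx[i], qy + dy[i]
--                         if (
--                             0 <= nx < w
--                             and 0 <= ny < h
--                             and image[nx][ny] == 1
--                             and visited[nx][ny] == 0
--                         ):
--                             queue.append((nx, ny))
--                             labels[nx][ny] = cnt
--                             visited[nx][ny] = 1
--     return labels
-- ===== SOURCE B (Python) =====
-- def label_components(image):
--     w, h = len(image), len(image[0])
--     label = {}
--     seen = set()
--     cnt = 0
--     for x in range(w):
--         for y in range(h):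
--             if image[x][y] == 1 and (x, y) not in seen:
--                 cnt += 1
--                 seen.add((x, y))
--                 label[(x, y)] = cnt
--                 stack = [(x, y)]
--                 while stack:
--                     px, py = stack.pop()
--                     for nx, ny in ((px + 1, py), (px, py + 1), (px - 1, py), (px, py - 1)):
--                         if 0 <= nx < w and 0 <= ny < h and image[nx][ny] == 1 and (nx, ny) not in seen:
--                             seen.add((nx, ny))
--                             label[(nx, ny)] = cnt
--                             stack.append((nx, ny))
--     return [[label.get((x, y), 0) for y in range(h)] for x in range(w)]
-- ===== Notes on version B (the rewrite author's own statement) =====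
-- stated objective: alternative
-- what changed: A floods each component breadth-first with a FIFO queue (pop(0)) over two full w*h mark matrices mutated in place; B floods depth-first with a LIFO stack over a seen-set and a label dictionary and builds the output grid once at the end.
import Mathlib
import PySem

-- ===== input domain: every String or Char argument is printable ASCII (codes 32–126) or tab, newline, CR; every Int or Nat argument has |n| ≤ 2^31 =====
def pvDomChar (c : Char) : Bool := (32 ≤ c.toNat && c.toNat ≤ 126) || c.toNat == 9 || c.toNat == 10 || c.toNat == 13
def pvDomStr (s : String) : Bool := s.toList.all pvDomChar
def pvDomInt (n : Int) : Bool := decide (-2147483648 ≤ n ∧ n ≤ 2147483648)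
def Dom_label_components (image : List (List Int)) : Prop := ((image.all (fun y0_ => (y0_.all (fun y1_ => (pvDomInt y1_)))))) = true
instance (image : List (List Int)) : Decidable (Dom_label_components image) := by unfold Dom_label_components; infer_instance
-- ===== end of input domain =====

-- B replaces A's FIFO breadth-first flood over two w×h mark matrices by a LIFO stack flood over a
-- seen-set and a label dictionary, building the output grid once at the end (objective: alternative).

-- ===== PORT A =====

-- image[x][y] (resp. labels/visited[x][y]); exact wherever the Python reads it, since every read
-- in both programs is guarded by 0 ≤ x < w and 0 ≤ y < h bounds checks (or ranges over them).
def pvAt (g : List (List Int)) (x y : Int) : Int :=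
  (PySem.List.pyGet? ((PySem.List.pyGet? g x).getD []) y).getD 0

-- g[x][y] = v; used only with indices already checked in range
def pvSet2 (g : List (List Int)) (x y v : Int) : List (List Int) :=
  g.modify x.toNat (fun row => row.set y.toNat v)

-- the pairs (dx[i], dy[i]) of A, in loop order i = 0..3
def pvDirs : List (Int × Int) := [(1, 0), (0, 1), (-1, 0), (0, -1)]

-- body of A's `for i in range(4)` over state (labels, visited, queue)
def pvStepA (image : List (List Int)) (w h cnt : Int) (q : Int × Int)
    (st : List (List Int) × List (List Int) × List (Int × Int)) :
    List (List Int) × List (List Int) × List (Int × Int) :=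
  pvDirs.foldl (fun st d =>
    let nx := q.1 + d.1
    let ny := q.2 + d.2
    if 0 ≤ nx ∧ nx < w ∧ 0 ≤ ny ∧ ny < h ∧ pvAt image nx ny = 1 ∧ pvAt st.2.1 nx ny = 0 then
      (pvSet2 st.1 nx ny cnt, pvSet2 st.2.1 nx ny 1, st.2.2 ++ [(nx, ny)])
    else st) st

-- A's `while queue:` with `queue.pop(0)`; fuel only makes the recursion structural, each
-- iteration pops one element and the caller passes more fuel than iterations can happen
def pvBFSA (image : List (List Int)) (w h cnt : Int) :
    Nat → List (List Int) → List (List Int) → List (Int × Int) →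
    List (List Int) × List (List Int)
  | 0, labels, visited, _ => (labels, visited)
  | _ + 1, labels, visited, [] => (labels, visited)
  | f + 1, labels, visited, q :: rest =>
    let st := pvStepA image w h cnt q (labels, visited, rest)
    pvBFSA image w h cnt f st.1 st.2.1 st.2.2

def label_components (image : List (List Int)) : List (List Int) :=
  let w : Int := image.length
  let h : Int := ((PySem.List.pyGet? image 0).getD []).length
  let init : List (List Int) := List.replicate w.toNat (List.replicate h.toNat 0)
  let fin :=
    (PySem.List.pyRange 0 w 1).foldl (fun st x =>
      (PySem.List.pyRange 0 h 1).foldl (fun st y =>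
        if pvAt image x y = 1 ∧ pvAt st.2.1 x y = 0 then
          let visited := pvSet2 st.2.1 x y 1
          let cnt := st.2.2 + 1
          let labels := pvSet2 st.1 x y cnt
          let r := pvBFSA image w h cnt (w.toNat * h.toNat + 1) labels visited [(x, y)]
          (r.1, r.2, cnt)
        else st) st)
      (init, init, (0 : Int))
  fin.1

-- ===== PORT B =====

-- the 4-neighbour tuple ((px+1,py),(px,py+1),(px-1,py),(px,py-1)) of Source B
def pvAdj (p : Int × Int) : List (Int × Int) :=
  [(p.1 + 1, p.2), (p.1, p.2 + 1), (p.1 - 1, p.2), (p.1, p.2 - 1)]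

-- body of B's `for nx, ny in (...)` over state (label, seen, stack)
def pvStepB (image : List (List Int)) (w h cnt : Int) (p : Int × Int)
    (st : PySem.Dict (Int × Int) Int × PySem.Set (Int × Int) × List (Int × Int)) :
    PySem.Dict (Int × Int) Int × PySem.Set (Int × Int) × List (Int × Int) :=
  (pvAdj p).foldl (fun st n =>
    if 0 ≤ n.1 ∧ n.1 < w ∧ 0 ≤ n.2 ∧ n.2 < h ∧ pvAt image n.1 n.2 = 1 ∧
        PySem.Set.contains st.2.1 n = false then
      (st.1.insert n cnt, PySem.Set.add st.2.1 n, st.2.2 ++ [n])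
    else st) st

-- B's `while stack:` with `stack.pop()` (pop from the END); fuel as in pvBFSA
def pvDFSB (image : List (List Int)) (w h cnt : Int) :
    Nat → PySem.Dict (Int × Int) Int × PySem.Set (Int × Int) × List (Int × Int) →
    PySem.Dict (Int × Int) Int × PySem.Set (Int × Int)
  | 0, st => (st.1, st.2.1)
  | f + 1, st =>
    match st.2.2.getLast? with
    | none => (st.1, st.2.1)
    | some p =>
      pvDFSB image w h cnt f (pvStepB image w h cnt p (st.1, st.2.1, st.2.2.dropLast))

def label_components_alt (image : List (List Int)) : List (List Int) :=
  let w : Int := image.length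
  let h : Int := ((PySem.List.pyGet? image 0).getD []).length
  let fin :=
    (PySem.List.pyRange 0 w 1).foldl (fun st x =>
      (PySem.List.pyRange 0 h 1).foldl (fun st y =>
        if pvAt image x y = 1 ∧ PySem.Set.contains st.2.1 (x, y) = false then
          let cnt := st.2.2 + 1
          let seen := PySem.Set.add st.2.1 (x, y)
          let label := st.1.insert (x, y) cnt
          let r := pvDFSB image w h cnt (w.toNat * h.toNat + 1) (label, seen, [(x, y)])
          (r.1, r.2, cnt)
        else st) st)
      (PySem.Dict.empty, PySem.Set.empty, (0 : Int))
  (PySem.List.pyRange 0 w 1).map (fun x =>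
    (PySem.List.pyRange 0 h 1).map (fun y => fin.1.getD (x, y) 0))

-- ===== PRECONDITION & SPEC =====

-- Pre_ excludes exactly the inputs on which the Python A raises IndexError: the empty image
-- (image[0]) and images in which some row is shorter than the first row (image[x][y]).
def Pre_label_components (image : List (List Int)) : Prop :=
  image ≠ [] ∧ ∀ row ∈ image, ((image.head?).getD []).length ≤ row.length

instance (image : List (List Int)) : Decidable (Pre_label_components image) := by
  unfold Pre_label_components; infer_instance

def pvWitness_label_components : List (List Int) := [[1, 0, 1], [1, 1, 0]]

def Spec_label_components (image : List (List Int)) (out : List (List Int)) : Prop :=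
  out = label_components_alt image
instance (image : List (List Int)) (out : List (List Int)) : Decidable (Spec_label_components image out) := by
  unfold Spec_label_components; infer_instance

-- ===== CLAIM (what is proved, stated in full; the proofs are below) =====
def Claim_equal_label_components : Prop := ∀ (image : List (List Int)), Dom_label_components image → Pre_label_components image → Spec_label_components image (label_components image)

-- ===== LEMMAS AND PROOFS =====

-- p is a coordinate of the w×h grid
abbrev pvInR (w h : Int) (p : Int × Int) : Prop :=
  0 ≤ p.1 ∧ p.1 < w ∧ 0 ≤ p.2 ∧ p.2 < h

-- foreground pixel of the grid
abbrev pvGoodP (image : List (List Int)) (w h : Int) (p : Int × Int) : Prop :=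
  pvInR w h p ∧ pvAt image p.1 p.2 = 1

-- a matrix cell is marked (visited)
abbrev pvMk (v : List (List Int)) (p : Int × Int) : Prop := pvAt v p.1 p.2 = 1

-- the matrix is a w×h grid
def pvShape (w h : Int) (g : List (List Int)) : Prop :=
  g.length = w.toNat ∧ ∀ (i : Nat), i < g.length → ∀ (hi : i < g.length), g[i].length = h.toNat

-- 4-connectivity reachability from s through foreground cells outside the avoid set V
inductive PvReach (image : List (List Int)) (w h : Int) (V : Int × Int → Prop) :
    (Int × Int) → (Int × Int) → Prop
  | refl (s : Int × Int) : PvReach image w h V s s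
  | step {s a c : Int × Int} : PvReach image w h V s a → c ∈ pvAdj a →
      pvGoodP image w h c → ¬ V c → PvReach image w h V s c

-- number of unmarked entries of the visited matrix (the BFS measure, with the queue length)
def pvFresh (g : List (List Int)) : Nat :=
  (g.map (fun r => r.countP (fun e => !(e == 1)))).sum

-- all grid coordinates (the DFS measure counts the ones not yet seen)
def pvCells (w h : Int) : List (Int × Int) :=
  (List.range w.toNat).flatMap (fun i : Nat => (List.range h.toNat).map (fun j : Nat => ((i : Int), (j : Int))))

def pvSeenCnt (w h : Int) (seen : List (Int × Int)) : Nat :=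
  (pvCells w h).countP (fun c => !(decide (c ∈ seen)))

-- ---- small infrastructure lemmas ----

-- normal form for reads at nonnegative indices
theorem pvAt_nn (g : List (List Int)) (x y : Int) (hx : 0 ≤ x) (hy : 0 ≤ y) :
    pvAt g x y = (g.getD x.toNat []).getD y.toNat 0 := by
  rw [pvAt, PySem.List.pyGet?_of_nonneg _ hx, PySem.List.pyGet?_of_nonneg _ hy]
  simp [List.getD_eq_getElem?_getD]

theorem pvAt_natCast (g : List (List Int)) (i j : Nat)
    (hi : i < g.length) : pvAt g (i : Int) (j : Int) = (g[i].getD j 0) := by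
  rw [pvAt_nn g _ _ (by omega) (by omega)]
  simp [List.getD_eq_getElem?_getD, List.getElem?_eq_getElem hi]

theorem pvShape_set2 (w h : Int) (g : List (List Int)) (x y v : Int)
    (hs : pvShape w h g) : pvShape w h (pvSet2 g x y v) := by
  obtain ⟨h1, h2⟩ := hs
  refine ⟨by simpa [pvSet2] using h1, ?_⟩
  intro i hi hi'
  simp only [pvSet2] at hi' ⊢
  have hlen : i < g.length := by simpa [pvSet2] using hi
  rw [List.getElem_modify]
  split
  · rw [List.length_set]; exact h2 i hlen hlen
  · exact h2 i hlen hlen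

theorem pvAt_set2 (w h : Int) (g : List (List Int)) (x y v : Int)
    (hs : pvShape w h g) (hin : pvInR w h (x, y)) (x' y' : Int)
    (hin' : pvInR w h (x', y')) :
    pvAt (pvSet2 g x y v) x' y' = if x' = x ∧ y' = y then v else pvAt g x' y' := by
  obtain ⟨hx0, hxw, hy0, hyh⟩ := hin
  obtain ⟨hx0', hxw', hy0', hyh'⟩ := hin'
  obtain ⟨hl, hr⟩ := hs
  simp only at hx0 hxw hy0 hyh hx0' hxw' hy0' hyh'
  have hxg : x.toNat < g.length := by omega
  rw [pvAt_nn _ _ _ hx0' hy0', pvAt_nn _ _ _ hx0' hy0']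
  simp only [pvSet2, List.getD_eq_getElem?_getD, List.getElem?_modify]
  by_cases hxx : x' = x
  · subst hxx
    have hyg : y.toNat < g[x'.toNat].length := by rw [hr x'.toNat hxg hxg]; omega
    by_cases hyy : y' = y
    · subst hyy
      simp [List.getElem?_eq_getElem hxg, List.getElem?_set, hyg, List.getElem?_eq_getElem hyg]
    · have hne2 : y.toNat ≠ y'.toNat := by omega
      simp [List.getElem?_eq_getElem hxg, List.getElem?_set, hne2, hyy]
  · have hne : x.toNat ≠ x'.toNat := by omega
    simp [hne, hxx]

theorem pvFreshRow (r : List Int) (j : Nat) (hj : j < r.length) (hne : r[j] ≠ 1) :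
    (r.set j 1).countP (fun e => !(e == 1)) + 1 = r.countP (fun e => !(e == 1)) := by
  rw [List.countP_set hj]
  have hpos : 0 < r.countP (fun e => !(e == 1)) :=
    List.countP_pos_iff.mpr ⟨r[j], List.getElem_mem hj, by simpa using hne⟩
  have h1 : (!(r[j] == 1)) = true := by simpa using hne
  simp only [h1, if_true]
  norm_num
  omega

theorem pvFresh_modify (g : List (List Int)) : ∀ (i : Nat) (hi : i < g.length) (j : Nat)
    (hj : j < g[i].length), g[i][j] ≠ 1 →
    pvFresh (g.modify i (fun r => r.set j 1)) + 1 = pvFresh g := by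
  induction g with
  | nil => intro i hi; simp at hi
  | cons r g ih =>
    intro i hi j hj hne
    cases i with
    | zero =>
      simp only [List.getElem_cons_zero] at hj hne
      rw [List.modify_zero_cons]
      have := pvFreshRow r j hj hne
      simp only [pvFresh, List.map_cons, List.sum_cons]
      omega
    | succ i =>
      simp only [List.getElem_cons_succ] at hj hne
      rw [List.modify_succ_cons]
      have := ih i (by simpa using hi) j hj hne
      simp only [pvFresh, List.map_cons, List.sum_cons] at this ⊢
      omega

theorem pvFresh_set2 (w h : Int) (g : List (List Int)) (x y : Int)
    (hs : pvShape w h g) (hin : pvInR w h (x, y)) (hfresh : pvAt g x y ≠ 1) :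
    pvFresh (pvSet2 g x y 1) + 1 = pvFresh g := by
  obtain ⟨hx0, hxw, hy0, hyh⟩ := hin
  obtain ⟨hl, hr⟩ := hs
  simp only at hx0 hxw hy0 hyh
  have hxg : x.toNat < g.length := by omega
  have hyg : y.toNat < g[x.toNat].length := by rw [hr x.toNat hxg hxg]; omega
  have hne : g[x.toNat][y.toNat] ≠ 1 := by
    rw [pvAt_nn _ _ _ hx0 hy0] at hfresh
    simpa [List.getD_eq_getElem?_getD, List.getElem?_eq_getElem hxg,
      List.getElem?_eq_getElem hyg] using hfresh
  exact pvFresh_modify g x.toNat hxg y.toNat hyg hne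

theorem pvFresh_le (w h : Int) (g : List (List Int)) (hs : pvShape w h g) :
    pvFresh g ≤ w.toNat * h.toNat := by
  obtain ⟨hl, hr⟩ := hs
  have aux : ∀ (g' : List (List Int)),
      (∀ (i : Nat), i < g'.length → ∀ (hi : i < g'.length), g'[i].length = h.toNat) →
      pvFresh g' ≤ g'.length * h.toNat := by
    intro g'
    induction g' with
    | nil => intro _; simp [pvFresh]
    | cons r t ih =>
      intro hsh
      have h0 : r.length = h.toNat := hsh 0 (by simp) (by simp)
      have ht : pvFresh t ≤ t.length * h.toNat := by
        apply ih
        intro i hi hi'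
        simpa using hsh (i + 1) (by simpa using Nat.succ_lt_succ hi) (by simpa using Nat.succ_lt_succ hi)
      have hc : r.countP (fun e => !(e == 1)) ≤ h.toNat := h0 ▸ List.countP_le_length
      simp only [pvFresh, List.map_cons, List.sum_cons, List.length_cons] at ht ⊢
      calc r.countP (fun e => !(e == 1)) + (t.map (fun r => r.countP (fun e => !(e == 1)))).sum
          ≤ h.toNat + t.length * h.toNat := Nat.add_le_add hc ht
        _ = (t.length + 1) * h.toNat := by ring
  have := aux g hr
  rw [hl] at this
  exact this

theorem pvCells_nodup (w h : Int) : (pvCells w h).Nodup := by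
  rw [pvCells, List.nodup_flatMap]
  constructor
  · intro i _
    exact List.Nodup.map (f := fun j : Nat => ((i : Int), (j : Int)))
      (fun a b hab => by simpa using hab) List.nodup_range
  · refine List.Pairwise.imp ?_ (List.pairwise_lt_range)
    intro a b hab
    intro p hpa hpb
    simp only [List.mem_map, List.mem_range] at hpa hpb
    obtain ⟨ja, _, rfl⟩ := hpa
    obtain ⟨jb, _, h2⟩ := hpb
    have hba : (b : Int) = a := by
      have := congrArg Prod.fst h2
      simpa using this
    omega

theorem pvCells_mem (w h : Int) (p : Int × Int) : p ∈ pvCells w h ↔ pvInR w h p := by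
  simp only [pvCells, List.mem_flatMap, List.mem_map, List.mem_range, pvInR]
  constructor
  · rintro ⟨i, hi, j, hj, rfl⟩
    constructor
    · omega
    refine ⟨?_, by omega, ?_⟩ <;> omega
  · rintro ⟨h1, h2, h3, h4⟩
    refine ⟨p.1.toNat, by omega, p.2.toNat, by omega, ?_⟩
    have : ((p.1.toNat : Int), (p.2.toNat : Int)) = (p.1, p.2) := by
      simp [Int.toNat_of_nonneg h1, Int.toNat_of_nonneg h3]
    simpa using this

theorem pvCells_length (w h : Int) : (pvCells w h).length = w.toNat * h.toNat := by
  simp [pvCells, List.length_flatMap, List.map_const', Function.comp]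

theorem pvSeenCnt_append (w h : Int) (seen : List (Int × Int)) (n : Int × Int)
    (hin : pvInR w h n) (hfresh : n ∉ seen) :
    pvSeenCnt w h (seen ++ [n]) + 1 = pvSeenCnt w h seen := by
  have hmem : n ∈ pvCells w h := (pvCells_mem w h n).mpr hin
  have hnd := pvCells_nodup w h
  obtain ⟨l₁, l₂, hsplit⟩ := List.append_of_mem hmem
  unfold pvSeenCnt
  rw [hsplit] at hnd ⊢
  rw [List.nodup_append] at hnd
  obtain ⟨nd1, nd2, disj⟩ := hnd
  have hn1 : n ∉ l₁ := fun hc => disj n hc n (by simp) rfl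
  have hn2 : n ∉ l₂ := (List.nodup_cons.mp nd2).1
  have hagree : ∀ (l : List (Int × Int)), n ∉ l →
      l.countP (fun c => !(decide (c ∈ seen ++ [n]))) = l.countP (fun c => !(decide (c ∈ seen))) := by
    intro l hnl
    apply List.countP_congr
    intro x hx
    have hxn : x ≠ n := fun hc => hnl (hc ▸ hx)
    simp [List.mem_append, hxn]
  rw [List.countP_append, List.countP_append, List.countP_cons, List.countP_cons,
    hagree l₁ hn1, hagree l₂ hn2]
  simp [hfresh]
  omega

theorem pvSeenCnt_le (w h : Int) (seen : List (Int × Int)) :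
    pvSeenCnt w h seen ≤ w.toNat * h.toNat := by
  calc pvSeenCnt w h seen ≤ (pvCells w h).length := List.countP_le_length
    _ = w.toNat * h.toNat := pvCells_length w h

-- reachable cells lie in any set containing the seed and closed under good neighbours
theorem pvReach_imp (image : List (List Int)) (w h : Int) (V : Int × Int → Prop)
    (seed : Int × Int) (M : Int × Int → Prop)
    (hseedM : M seed) (hseedR : pvInR w h seed)
    (hcl : ∀ p, pvInR w h p → M p → ∀ n ∈ pvAdj p, pvGoodP image w h n → M n) :
    ∀ t, PvReach image w h V seed t → M t := by
  have key : ∀ t, PvReach image w h V seed t → M t ∧ pvInR w h t := by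
    intro t ht
    induction ht with
    | refl => exact ⟨hseedM, hseedR⟩
    | step hrec hadj hgood hV ih =>
      exact ⟨hcl _ ih.2 ih.1 _ hadj hgood, hgood.1⟩
  exact fun t ht => (key t ht).1

-- ---- A-side flood invariant ----

structure PvIA (image : List (List Int)) (w h cnt : Int) (V₀ : Int × Int → Prop)
    [DecidablePred V₀] (seed : Int × Int) (L₀ : Int × Int → Int)
    (labels visited : List (List Int)) (queue : List (Int × Int)) : Prop where
  shL : pvShape w h labels
  shV : pvShape w h visited
  binV : ∀ p, pvInR w h p → pvAt visited p.1 p.2 = 0 ∨ pvAt visited p.1 p.2 = 1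
  monoV : ∀ p, V₀ p → pvMk visited p
  qmem : ∀ p ∈ queue, pvInR w h p ∧ pvMk visited p
  closedI : ∀ p, pvInR w h p → pvMk visited p → p ∉ queue →
    ∀ n ∈ pvAdj p, pvGoodP image w h n → pvMk visited n
  reachI : ∀ p, pvInR w h p → pvMk visited p → V₀ p ∨ PvReach image w h V₀ seed p
  lblI : ∀ p, pvInR w h p → pvAt labels p.1 p.2 =
    if (pvMk visited p ∧ ¬ V₀ p) ∨ p = seed then cnt else L₀ p

-- one pass of A's direction loop, restated over the neighbour list
theorem pvStepA_fold (image : List (List Int)) (w h cnt : Int) :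
    ∀ (ns : List (Int × Int)) (labels visited : List (List Int)) (queue : List (Int × Int)),
    pvShape w h labels → pvShape w h visited →
    (∀ p, pvInR w h p → pvAt visited p.1 p.2 = 0 ∨ pvAt visited p.1 p.2 = 1) →
    (let r := ns.foldl (fun st n =>
        if 0 ≤ n.1 ∧ n.1 < w ∧ 0 ≤ n.2 ∧ n.2 < h ∧ pvAt image n.1 n.2 = 1 ∧
            pvAt st.2.1 n.1 n.2 = 0 then
          (pvSet2 st.1 n.1 n.2 cnt, pvSet2 st.2.1 n.1 n.2 1, st.2.2 ++ [n])
        else st) (labels, visited, queue)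
     ∃ new : List (Int × Int),
      r.2.2 = queue ++ new ∧
      pvShape w h r.1 ∧ pvShape w h r.2.1 ∧
      (∀ p, pvInR w h p → pvAt r.2.1 p.1 p.2 = 0 ∨ pvAt r.2.1 p.1 p.2 = 1) ∧
      (∀ p, pvInR w h p → (pvMk r.2.1 p ↔ pvMk visited p ∨ p ∈ new)) ∧
      (∀ n ∈ new, n ∈ ns ∧ pvGoodP image w h n ∧ ¬ pvMk visited n) ∧
      (∀ n ∈ ns, pvGoodP image w h n → pvMk r.2.1 n) ∧
      (∀ p, pvInR w h p → pvAt r.1 p.1 p.2 = if p ∈ new then cnt else pvAt labels p.1 p.2) ∧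
      pvFresh r.2.1 + new.length = pvFresh visited) := by
  intro ns
  induction ns with
  | nil =>
    intro labels visited queue shL shV binV
    exact ⟨[], by simp, shL, shV, binV, fun p hp => by simp, by simp, by simp,
      fun p hp => by simp, by simp⟩
  | cons n ns ih =>
    intro labels visited queue shL shV binV
    simp only [List.foldl_cons]
    by_cases hg : (0 ≤ n.1 ∧ n.1 < w ∧ 0 ≤ n.2 ∧ n.2 < h ∧ pvAt image n.1 n.2 = 1 ∧
        pvAt visited n.1 n.2 = 0)
    · rw [if_pos hg]
      obtain ⟨hn10, hn1w, hn20, hn2h, him, hfr⟩ := hg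
      have hinn : pvInR w h n := ⟨hn10, hn1w, hn20, hn2h⟩
      have hgood : pvGoodP image w h n := ⟨hinn, him⟩
      have hshL' := pvShape_set2 w h labels n.1 n.2 cnt shL
      have hshV' := pvShape_set2 w h visited n.1 n.2 1 shV
      have hAtV : ∀ p, pvInR w h p → pvAt (pvSet2 visited n.1 n.2 1) p.1 p.2 =
          if p.1 = n.1 ∧ p.2 = n.2 then 1 else pvAt visited p.1 p.2 :=
        fun p hp => pvAt_set2 w h visited n.1 n.2 1 shV hinn p.1 p.2 hp
      have hAtL : ∀ p, pvInR w h p → pvAt (pvSet2 labels n.1 n.2 cnt) p.1 p.2 =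
          if p.1 = n.1 ∧ p.2 = n.2 then cnt else pvAt labels p.1 p.2 :=
        fun p hp => pvAt_set2 w h labels n.1 n.2 cnt shL hinn p.1 p.2 hp
      have hbin' : ∀ p, pvInR w h p →
          pvAt (pvSet2 visited n.1 n.2 1) p.1 p.2 = 0 ∨ pvAt (pvSet2 visited n.1 n.2 1) p.1 p.2 = 1 := by
        intro p hp
        rw [hAtV p hp]
        split_ifs
        · right; rfl
        · exact binV p hp
      have hMkIff : ∀ p, pvInR w h p → (pvMk (pvSet2 visited n.1 n.2 1) p ↔ p = n ∨ pvMk visited p) := by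
        intro p hp
        unfold pvMk
        rw [hAtV p hp]
        constructor
        · intro hh
          by_cases hc : p.1 = n.1 ∧ p.2 = n.2
          · exact Or.inl (Prod.ext hc.1 hc.2)
          · exact Or.inr (by rwa [if_neg hc] at hh)
        · rintro (rfl | hh)
          · simp
          · split_ifs <;> [rfl; exact hh]
      obtain ⟨new', c1, c2, c3, c4, c5, c6, c7, c8, c9⟩ :=
        ih (pvSet2 labels n.1 n.2 cnt) (pvSet2 visited n.1 n.2 1) (queue ++ [n]) hshL' hshV' hbin'
      refine ⟨n :: new', ?_, c2, c3, c4, ?_, ?_, ?_, ?_, ?_⟩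
      · rw [c1]; simp
      · intro p hp
        rw [c5 p hp, hMkIff p hp]
        simp only [List.mem_cons]
        tauto
      · intro m hm
        rcases List.mem_cons.mp hm with rfl | hm'
        · exact ⟨List.mem_cons_self .., hgood, by simp [pvMk, hfr]⟩
        · obtain ⟨hmns, hmg, hmfr⟩ := c6 m hm'
          refine ⟨List.mem_cons_of_mem _ hmns, hmg, ?_⟩
          intro hc
          exact hmfr ((hMkIff m hmg.1).mpr (Or.inr hc))
      · intro m hm hmg
        rcases List.mem_cons.mp hm with rfl | hm'
        · exact (c5 m hmg.1).mpr (Or.inl ((hMkIff m hmg.1).mpr (Or.inl rfl)))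
        · exact c7 m hm' hmg
      · intro p hp
        rw [c8 p hp, hAtL p hp]
        by_cases hpn : p ∈ new'
        · simp [hpn, List.mem_cons]
        · by_cases hpe : p = n
          · subst hpe
            simp
          · have : ¬(p.1 = n.1 ∧ p.2 = n.2) := fun hc => hpe (Prod.ext hc.1 hc.2)
            simp [hpn, hpe, this]
      · have hne1 : pvAt visited n.1 n.2 ≠ 1 := by rw [hfr]; omega
        have := pvFresh_set2 w h visited n.1 n.2 shV hinn hne1
        simp only [List.length_cons]
        omega
    · rw [if_neg hg]
      obtain ⟨new', c1, c2, c3, c4, c5, c6, c7, c8, c9⟩ := ih labels visited queue shL shV binV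
      refine ⟨new', c1, c2, c3, c4, c5, ?_, ?_, c8, c9⟩
      · intro m hm
        obtain ⟨hmns, hmg, hmfr⟩ := c6 m hm
        exact ⟨List.mem_cons_of_mem _ hmns, hmg, hmfr⟩
      · intro m hm hmg
        rcases List.mem_cons.mp hm with rfl | hm'
        · -- the guard failed although m is good: it must already be marked
          have hmk : pvMk visited m := by
            rcases binV m hmg.1 with h0 | h1x
            · exact absurd ⟨hmg.1.1, hmg.1.2.1, hmg.1.2.2.1, hmg.1.2.2.2, hmg.2, h0⟩ hg
            · exact h1x
          exact (c5 m hmg.1).mpr (Or.inl hmk)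
        · exact c7 m hm' hmg

-- A's step function is that fold over the neighbour list
theorem pvStepA_eq (image : List (List Int)) (w h cnt : Int) (q : Int × Int)
    (st : List (List Int) × List (List Int) × List (Int × Int)) :
    pvStepA image w h cnt q st = (pvAdj q).foldl (fun st n =>
        if 0 ≤ n.1 ∧ n.1 < w ∧ 0 ≤ n.2 ∧ n.2 < h ∧ pvAt image n.1 n.2 = 1 ∧
            pvAt st.2.1 n.1 n.2 = 0 then
          (pvSet2 st.1 n.1 n.2 cnt, pvSet2 st.2.1 n.1 n.2 1, st.2.2 ++ [n])
        else st) st := by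
  rw [pvStepA]
  rw [show pvAdj q = pvDirs.map (fun d => (q.1 + d.1, q.2 + d.2)) by
    simp [pvAdj, pvDirs]; omega]
  rw [List.foldl_map]

-- a finished flood (empty queue) realises the reachability characterisation
theorem pvIA_final (image : List (List Int)) (w h cnt : Int) (V₀ : Int × Int → Prop)
    [DecidablePred V₀] (seed : Int × Int) (L₀ : Int × Int → Int)
    (hseedIn : pvInR w h seed) (hseedV : V₀ seed)
    (labels visited : List (List Int))
    (hI : PvIA image w h cnt V₀ seed L₀ labels visited []) :
    pvShape w h labels ∧ pvShape w h visited ∧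
    (∀ p, pvInR w h p → pvAt visited p.1 p.2 = 0 ∨ pvAt visited p.1 p.2 = 1) ∧
    (∀ p, pvInR w h p → (pvMk visited p ↔ V₀ p ∨ PvReach image w h V₀ seed p)) ∧
    (∀ p, pvInR w h p → pvAt labels p.1 p.2 =
      if (pvMk visited p ∧ ¬ V₀ p) ∨ p = seed then cnt else L₀ p) := by
  refine ⟨hI.shL, hI.shV, hI.binV, ?_, hI.lblI⟩
  intro p hp
  constructor
  · exact hI.reachI p hp
  · rintro (hV | hR)
    · exact hI.monoV p hV
    · exact pvReach_imp image w h V₀ seed (pvMk visited) (hI.monoV seed hseedV) hseedIn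
        (fun p' hpIn hMp nn hnadj hgood => hI.closedI p' hpIn hMp (by simp) nn hnadj hgood) p hR

-- the BFS flood of A: final state characterised by reachability
theorem pvBFSA_spec (image : List (List Int)) (w h cnt : Int) (V₀ : Int × Int → Prop)
    [DecidablePred V₀] (seed : Int × Int) (L₀ : Int × Int → Int)
    (hseedIn : pvInR w h seed) (hseedV : V₀ seed)
    (hV0in : ∀ p, V₀ p → pvInR w h p)
    (hcl0 : ∀ p, V₀ p → p ≠ seed → ∀ n ∈ pvAdj p, pvGoodP image w h n → V₀ n) :
    ∀ (fuel : Nat) (labels visited : List (List Int)) (queue : List (Int × Int)),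
    PvIA image w h cnt V₀ seed L₀ labels visited queue →
    queue.length + pvFresh visited ≤ fuel →
    (let r := pvBFSA image w h cnt fuel labels visited queue
     pvShape w h r.1 ∧ pvShape w h r.2 ∧
     (∀ p, pvInR w h p → pvAt r.2 p.1 p.2 = 0 ∨ pvAt r.2 p.1 p.2 = 1) ∧
     (∀ p, pvInR w h p → (pvMk r.2 p ↔ V₀ p ∨ PvReach image w h V₀ seed p)) ∧
     (∀ p, pvInR w h p → pvAt r.1 p.1 p.2 =
        if (pvMk r.2 p ∧ ¬ V₀ p) ∨ p = seed then cnt else L₀ p)) := by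
  intro fuel
  induction fuel with
  | zero =>
    intro labels visited queue hI hfuel
    have hq : queue = [] := List.eq_nil_of_length_eq_zero (by omega)
    subst hq
    simpa [pvBFSA] using
      pvIA_final image w h cnt V₀ seed L₀ hseedIn hseedV labels visited hI
  | succ f ihf =>
    intro labels visited queue hI hfuel
    cases queue with
    | nil =>
      simpa [pvBFSA] using
        pvIA_final image w h cnt V₀ seed L₀ hseedIn hseedV labels visited hI
    | cons q rest =>
      have hqm := hI.qmem q (by simp)
      obtain ⟨new, c1, c2, c3, c4, c5, c6, c7, c8, c9⟩ :=
        pvStepA_fold image w h cnt (pvAdj q) labels visited rest hI.shL hI.shV hI.binV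
      simp only [pvBFSA, pvStepA_eq]
      set X := (pvAdj q).foldl (fun st n =>
        if 0 ≤ n.1 ∧ n.1 < w ∧ 0 ≤ n.2 ∧ n.2 < h ∧ pvAt image n.1 n.2 = 1 ∧
            pvAt st.2.1 n.1 n.2 = 0 then
          (pvSet2 st.1 n.1 n.2 cnt, pvSet2 st.2.1 n.1 n.2 1, st.2.2 ++ [n])
        else st) (labels, visited, rest) with hX
      apply ihf
      · exact {
          shL := c2
          shV := c3
          binV := c4
          monoV := fun p hV => (c5 p (hV0in p hV)).mpr (Or.inl (hI.monoV p hV))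
          qmem := by
            intro p hp
            rw [c1] at hp
            rcases List.mem_append.mp hp with hp1 | hp2
            · obtain ⟨hin, hmk⟩ := hI.qmem p (by simp [hp1])
              exact ⟨hin, (c5 p hin).mpr (Or.inl hmk)⟩
            · obtain ⟨hns, hgood, hfr⟩ := c6 p hp2
              exact ⟨hgood.1, (c5 p hgood.1).mpr (Or.inr hp2)⟩
          closedI := by
            intro p hpIn hmk hnotq nn hnadj hgood
            rw [c1] at hnotq
            rcases (c5 p hpIn).mp hmk with hold | hnew
            · by_cases hpq : p = q
              · subst hpq
                exact c7 nn hnadj hgood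
              · have hnq : p ∉ q :: rest := by
                  intro hc
                  rcases List.mem_cons.mp hc with hh | hh
                  · exact hpq hh
                  · exact hnotq (List.mem_append.mpr (Or.inl hh))
                exact (c5 nn hgood.1).mpr
                  (Or.inl (hI.closedI p hpIn hold hnq nn hnadj hgood))
            · exact absurd (List.mem_append.mpr (Or.inr hnew)) hnotq
          reachI := by
            intro p hpIn hmk
            rcases (c5 p hpIn).mp hmk with hold | hnew
            · exact hI.reachI p hpIn hold
            · obtain ⟨hns, hgood, hfr⟩ := c6 p hnew
              have hnV : ¬ V₀ p := fun hc => hfr (hI.monoV p hc)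
              rcases hI.reachI q hqm.1 hqm.2 with hVq | hRq
              · by_cases hqs : q = seed
                · subst hqs
                  exact Or.inr (PvReach.step (PvReach.refl q) hns hgood hnV)
                · exact absurd (hcl0 q hVq hqs p hns hgood) hnV
              · exact Or.inr (PvReach.step hRq hns hgood hnV)
          lblI := by
            intro p hpIn
            rw [c8 p hpIn]
            by_cases hpnew : p ∈ new
            · obtain ⟨hns, hgood, hfr⟩ := c6 p hpnew
              have hmkX : pvMk X.2.1 p := (c5 p hpIn).mpr (Or.inr hpnew)
              have hnV : ¬ V₀ p := fun hc => hfr (hI.monoV p hc)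
              rw [if_pos hpnew, if_pos (Or.inl ⟨hmkX, hnV⟩)]
            · rw [if_neg hpnew, hI.lblI p hpIn]
              have hiff : ((pvMk X.2.1 p ∧ ¬ V₀ p) ∨ p = seed) ↔
                  ((pvMk visited p ∧ ¬ V₀ p) ∨ p = seed) := by
                have h5 := c5 p hpIn
                tauto
              rw [if_congr hiff rfl rfl] }
      · have hlen : X.2.2.length = rest.length + new.length := by
          rw [c1, List.length_append]
        simp only [List.length_cons] at hfuel
        omega

-- ---- B-side flood invariant ----

structure PvIB (image : List (List Int)) (w h cnt : Int) (V₀ : Int × Int → Prop)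
    [DecidablePred V₀] (seed : Int × Int) (L₀ : Int × Int → Int)
    (label : PySem.Dict (Int × Int) Int) (seen : List (Int × Int))
    (stack : List (Int × Int)) : Prop where
  seenInR : ∀ p ∈ seen, pvInR w h p
  monoV : ∀ p, V₀ p → p ∈ seen
  smem : ∀ p ∈ stack, p ∈ seen
  closedI : ∀ p ∈ seen, p ∉ stack → ∀ n ∈ pvAdj p, pvGoodP image w h n → n ∈ seen
  reachI : ∀ p ∈ seen, V₀ p ∨ PvReach image w h V₀ seed p
  lblI : ∀ p, label.getD p 0 = if (p ∈ seen ∧ ¬ V₀ p) ∨ p = seed then cnt else L₀ p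

-- one pass of B's neighbour loop
theorem pvStepB_fold (image : List (List Int)) (w h cnt : Int) :
    ∀ (ns : List (Int × Int)) (label : PySem.Dict (Int × Int) Int)
      (seen stack : List (Int × Int)),
    (let r := ns.foldl (fun st n =>
        if 0 ≤ n.1 ∧ n.1 < w ∧ 0 ≤ n.2 ∧ n.2 < h ∧ pvAt image n.1 n.2 = 1 ∧
            PySem.Set.contains st.2.1 n = false then
          (st.1.insert n cnt, PySem.Set.add st.2.1 n, st.2.2 ++ [n])
        else st) (label, seen, stack)
     ∃ new : List (Int × Int),
      r.2.1 = seen ++ new ∧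
      r.2.2 = stack ++ new ∧
      (∀ n ∈ new, n ∈ ns ∧ pvGoodP image w h n ∧ n ∉ seen) ∧
      (∀ n ∈ ns, pvGoodP image w h n → n ∈ r.2.1) ∧
      (∀ p, r.1.getD p 0 = if p ∈ new then cnt else label.getD p 0) ∧
      pvSeenCnt w h r.2.1 + new.length = pvSeenCnt w h seen) := by
  intro ns
  induction ns with
  | nil =>
    intro label seen stack
    exact ⟨[], by simp, by simp, by simp, by simp, fun p => by simp, by simp⟩
  | cons n ns ih =>
    intro label seen stack
    simp only [List.foldl_cons]
    by_cases hg : (0 ≤ n.1 ∧ n.1 < w ∧ 0 ≤ n.2 ∧ n.2 < h ∧ pvAt image n.1 n.2 = 1 ∧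
        PySem.Set.contains seen n = false)
    · rw [if_pos hg]
      obtain ⟨hn10, hn1w, hn20, hn2h, him, hcont⟩ := hg
      have hgood : pvGoodP image w h n := ⟨⟨hn10, hn1w, hn20, hn2h⟩, him⟩
      have hfresh : n ∉ seen := by
        intro hc
        unfold PySem.Set.contains at hcont
        rw [List.contains_iff_mem.mpr hc] at hcont
        cases hcont
      have hadd : PySem.Set.add seen n = seen ++ [n] := by
        unfold PySem.Set.add
        rw [hcont]
        simp
      rw [hadd]
      obtain ⟨d1, d2, d3, d4, d5, d6⟩ :=
        (ih (label.insert n cnt) (seen ++ [n]) (stack ++ [n])).choose_spec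
      set new' := (ih (label.insert n cnt) (seen ++ [n]) (stack ++ [n])).choose with hn'
      refine ⟨n :: new', ?_, ?_, ?_, ?_, ?_, ?_⟩
      · rw [d1]; simp
      · rw [d2]; simp
      · intro m hm
        rcases List.mem_cons.mp hm with rfl | hm'
        · exact ⟨List.mem_cons_self .., hgood, hfresh⟩
        · obtain ⟨hmns, hmg, hmfr⟩ := d3 m hm'
          exact ⟨List.mem_cons_of_mem _ hmns, hmg,
            fun hc => hmfr (List.mem_append.mpr (Or.inl hc))⟩
      · intro m hm hmg
        rcases List.mem_cons.mp hm with rfl | hm'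
        · rw [d1]; simp
        · exact d4 m hm' hmg
      · intro p
        rw [d5 p, PySem.Dict.getD_insert]
        by_cases hpn : p ∈ new'
        · simp [hpn, List.mem_cons]
        · by_cases hpe : p = n
          · subst hpe; simp
          · simp [hpn, hpe]
      · have hstep := pvSeenCnt_append w h seen n hgood.1 hfresh
        simp only [List.length_cons]
        omega
    · rw [if_neg hg]
      obtain ⟨new', d1, d2, d3, d4, d5, d6⟩ := ih label seen stack
      refine ⟨new', d1, d2, ?_, ?_, d5, d6⟩
      · intro m hm
        obtain ⟨hmns, hmg, hmfr⟩ := d3 m hm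
        exact ⟨List.mem_cons_of_mem _ hmns, hmg, hmfr⟩
      · intro m hm hmg
        rcases List.mem_cons.mp hm with rfl | hm'
        · have hcont : PySem.Set.contains seen m = true := by
            rcases Bool.eq_false_or_eq_true (PySem.Set.contains seen m) with ht | hf
            · exact ht
            · exact absurd ⟨hmg.1.1, hmg.1.2.1, hmg.1.2.2.1, hmg.1.2.2.2, hmg.2, hf⟩ hg
          have hmem : m ∈ seen := by
            unfold PySem.Set.contains at hcont
            exact List.contains_iff_mem.mp hcont
          rw [d1]
          exact List.mem_append.mpr (Or.inl hmem)
        · exact d4 m hm' hmg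

theorem pvStepB_eq (image : List (List Int)) (w h cnt : Int) (p : Int × Int)
    (st : PySem.Dict (Int × Int) Int × PySem.Set (Int × Int) × List (Int × Int)) :
    pvStepB image w h cnt p st = (pvAdj p).foldl (fun st n =>
        if 0 ≤ n.1 ∧ n.1 < w ∧ 0 ≤ n.2 ∧ n.2 < h ∧ pvAt image n.1 n.2 = 1 ∧
            PySem.Set.contains st.2.1 n = false then
          (st.1.insert n cnt, PySem.Set.add st.2.1 n, st.2.2 ++ [n])
        else st) st := by
  rw [pvStepB]

-- a finished flood (empty stack) realises the reachability characterisation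
theorem pvIB_final (image : List (List Int)) (w h cnt : Int) (V₀ : Int × Int → Prop)
    [DecidablePred V₀] (seed : Int × Int) (L₀ : Int × Int → Int)
    (hseedIn : pvInR w h seed) (hseedV : V₀ seed)
    (label : PySem.Dict (Int × Int) Int) (seen : List (Int × Int))
    (hI : PvIB image w h cnt V₀ seed L₀ label seen []) :
    (∀ p ∈ seen, pvInR w h p) ∧
    (∀ p, (p ∈ seen ↔ V₀ p ∨ PvReach image w h V₀ seed p)) ∧
    (∀ p, label.getD p 0 = if (p ∈ seen ∧ ¬ V₀ p) ∨ p = seed then cnt else L₀ p) := by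
  refine ⟨hI.seenInR, ?_, hI.lblI⟩
  intro p
  constructor
  · exact hI.reachI p
  · rintro (hV | hR)
    · exact hI.monoV p hV
    · exact pvReach_imp image w h V₀ seed (· ∈ seen) (hI.monoV seed hseedV) hseedIn
        (fun p' hpIn hMp nn hnadj hgood => hI.closedI p' hMp (by simp) nn hnadj hgood) p hR

-- the DFS flood of B: same characterisation
theorem pvDFSB_spec (image : List (List Int)) (w h cnt : Int) (V₀ : Int × Int → Prop)
    [DecidablePred V₀] (seed : Int × Int) (L₀ : Int × Int → Int)
    (hseedIn : pvInR w h seed) (hseedV : V₀ seed)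
    (hV0in : ∀ p, V₀ p → pvInR w h p)
    (hcl0 : ∀ p, V₀ p → p ≠ seed → ∀ n ∈ pvAdj p, pvGoodP image w h n → V₀ n) :
    ∀ (fuel : Nat) (label : PySem.Dict (Int × Int) Int) (seen stack : List (Int × Int)),
    PvIB image w h cnt V₀ seed L₀ label seen stack →
    stack.length + pvSeenCnt w h seen ≤ fuel →
    (let r := pvDFSB image w h cnt fuel (label, seen, stack)
     (∀ p ∈ r.2, pvInR w h p) ∧
     (∀ p, (p ∈ r.2 ↔ V₀ p ∨ PvReach image w h V₀ seed p)) ∧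
     (∀ p, r.1.getD p 0 = if (p ∈ r.2 ∧ ¬ V₀ p) ∨ p = seed then cnt else L₀ p)) := by
  intro fuel
  induction fuel with
  | zero =>
    intro label seen stack hI hfuel
    have hq : stack = [] := List.eq_nil_of_length_eq_zero (by omega)
    subst hq
    simpa [pvDFSB] using
      pvIB_final image w h cnt V₀ seed L₀ hseedIn hseedV label seen hI
  | succ f ihf =>
    intro label seen stack hI hfuel
    rcases hstack : stack.getLast? with _ | q
    · have hq : stack = [] := by
        cases stack with
        | nil => rfl
        | cons a t => simp at hstack
      subst hq
      simpa [pvDFSB] using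
        pvIB_final image w h cnt V₀ seed L₀ hseedIn hseedV label seen hI
    · obtain ⟨ys, rfl⟩ := List.getLast?_eq_some_iff.mp hstack
      have hqseen : q ∈ seen := hI.smem q (by simp)
      simp only [pvDFSB, List.getLast?_concat, List.dropLast_concat]
      rw [pvStepB_eq]
      obtain ⟨new, d1, d2, d3, d4, d5, d6⟩ :=
        pvStepB_fold image w h cnt (pvAdj q) label seen ys
      set X := (pvAdj q).foldl (fun st n =>
        if 0 ≤ n.1 ∧ n.1 < w ∧ 0 ≤ n.2 ∧ n.2 < h ∧ pvAt image n.1 n.2 = 1 ∧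
            PySem.Set.contains st.2.1 n = false then
          (st.1.insert n cnt, PySem.Set.add st.2.1 n, st.2.2 ++ [n])
        else st) (label, seen, ys) with hX
      have hInv : PvIB image w h cnt V₀ seed L₀ X.1 X.2.1 X.2.2 := {
          seenInR := by
            intro p hp
            rw [d1] at hp
            rcases List.mem_append.mp hp with hp1 | hp2
            · exact hI.seenInR p hp1
            · exact (d3 p hp2).2.1.1
          monoV := fun p hV => by
            rw [d1]; exact List.mem_append.mpr (Or.inl (hI.monoV p hV))
          smem := by
            intro p hp
            rw [d2] at hp
            rw [d1]
            rcases List.mem_append.mp hp with hp1 | hp2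
            · exact List.mem_append.mpr (Or.inl (hI.smem p (by simp [hp1])))
            · exact List.mem_append.mpr (Or.inr hp2)
          closedI := by
            intro p hp hnotq nn hnadj hgood
            rw [d2] at hnotq
            rw [d1] at hp
            rcases List.mem_append.mp hp with hold | hnew
            · by_cases hpq : p = q
              · subst hpq
                exact d4 nn hnadj hgood
              · have hns : p ∉ ys ++ [q] := by
                  intro hc
                  rcases List.mem_append.mp hc with hh | hh
                  · exact hnotq (List.mem_append.mpr (Or.inl hh))
                  · exact hpq (by simpa using hh)
                have := hI.closedI p hold hns nn hnadj hgood
                rw [d1]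
                exact List.mem_append.mpr (Or.inl this)
            · exact absurd (List.mem_append.mpr (Or.inr hnew)) hnotq
          reachI := by
            intro p hp
            rw [d1] at hp
            rcases List.mem_append.mp hp with hold | hnew
            · exact hI.reachI p hold
            · obtain ⟨hns, hgood, hfr⟩ := d3 p hnew
              have hnV : ¬ V₀ p := fun hc => hfr (hI.monoV p hc)
              rcases hI.reachI q hqseen with hVq | hRq
              · by_cases hqs : q = seed
                · subst hqs
                  exact Or.inr (PvReach.step (PvReach.refl q) hns hgood hnV)
                · exact absurd (hcl0 q hVq hqs p hns hgood) hnV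
              · exact Or.inr (PvReach.step hRq hns hgood hnV)
          lblI := by
            intro p
            rw [d5 p]
            by_cases hpnew : p ∈ new
            · obtain ⟨hns, hgood, hfr⟩ := d3 p hpnew
              have hmkX : p ∈ X.2.1 := by rw [d1]; exact List.mem_append.mpr (Or.inr hpnew)
              have hnV : ¬ V₀ p := fun hc => hfr (hI.monoV p hc)
              rw [if_pos hpnew, if_pos (Or.inl ⟨hmkX, hnV⟩)]
            · rw [if_neg hpnew, hI.lblI p]
              have hiff : ((p ∈ X.2.1 ∧ ¬ V₀ p) ∨ p = seed) ↔
                  ((p ∈ seen ∧ ¬ V₀ p) ∨ p = seed) := by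
                rw [d1]
                simp only [List.mem_append]
                tauto
              rw [if_congr hiff rfl rfl] }
      have hmeas : X.2.2.length + pvSeenCnt w h X.2.1 ≤ f := by
        have hlen : X.2.2.length = ys.length + new.length := by
          rw [d2, List.length_append]
        simp only [List.length_append, List.length_singleton] at hfuel
        omega
      exact ihf X.1 X.2.1 X.2.2 hInv hmeas

-- ---- outer loop: the joint invariant ----

structure PvOI (image : List (List Int)) (w h : Int)
    (stA : List (List Int) × List (List Int) × Int)
    (stB : PySem.Dict (Int × Int) Int × PySem.Set (Int × Int) × Int) : Prop where
  shL : pvShape w h stA.1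
  shV : pvShape w h stA.2.1
  binV : ∀ p, pvInR w h p → pvAt stA.2.1 p.1 p.2 = 0 ∨ pvAt stA.2.1 p.1 p.2 = 1
  cntEq : stA.2.2 = stB.2.2
  visIff : ∀ p, pvInR w h p → (pvMk stA.2.1 p ↔ p ∈ stB.2.1)
  lblEq : ∀ p, pvInR w h p → pvAt stA.1 p.1 p.2 = stB.1.getD p 0
  seenInR : ∀ p ∈ stB.2.1, pvInR w h p
  closedS : ∀ p ∈ stB.2.1, ∀ n ∈ pvAdj p, pvGoodP image w h n → n ∈ stB.2.1

-- one outer-loop body step preserves the joint invariant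
theorem pvBody_step (image : List (List Int)) (w h : Int) (x y : Int)
    (hx0 : 0 ≤ x) (hx : x < w) (hy0 : 0 ≤ y) (hy : y < h)
    (stA : List (List Int) × List (List Int) × Int)
    (stB : PySem.Dict (Int × Int) Int × PySem.Set (Int × Int) × Int)
    (hOI : PvOI image w h stA stB) :
    PvOI image w h
      (if pvAt image x y = 1 ∧ pvAt stA.2.1 x y = 0 then
        let visited := pvSet2 stA.2.1 x y 1
        let cnt := stA.2.2 + 1
        let labels := pvSet2 stA.1 x y cnt
        let r := pvBFSA image w h cnt (w.toNat * h.toNat + 1) labels visited [(x, y)]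
        (r.1, r.2, cnt)
      else stA)
      (if pvAt image x y = 1 ∧ PySem.Set.contains stB.2.1 (x, y) = false then
        let cnt := stB.2.2 + 1
        let seen := PySem.Set.add stB.2.1 (x, y)
        let label := stB.1.insert (x, y) cnt
        let r := pvDFSB image w h cnt (w.toNat * h.toNat + 1) (label, seen, [(x, y)])
        (r.1, r.2, cnt)
      else stB) := by
  have hin : pvInR w h (x, y) := ⟨hx0, hx, hy0, hy⟩
  by_cases hfg : pvAt image x y = 1
  · by_cases hseen : (x, y) ∈ stB.2.1
    · -- already labelled: both guards fail
      have hA : ¬ (pvAt image x y = 1 ∧ pvAt stA.2.1 x y = 0) := by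
        have h1 : pvAt stA.2.1 x y = 1 := (hOI.visIff (x, y) hin).mpr hseen
        intro hc
        rw [hc.2] at h1
        norm_num at h1
      have hB : ¬ (pvAt image x y = 1 ∧ PySem.Set.contains stB.2.1 (x, y) = false) := by
        intro hc
        have := hc.2
        unfold PySem.Set.contains at this
        rw [List.contains_iff_mem.mpr hseen] at this
        cases this
      rw [if_neg hA, if_neg hB]
      exact hOI
    · -- fresh foreground pixel: both sides flood
      have hvis0 : pvAt stA.2.1 x y = 0 := by
        rcases hOI.binV (x, y) hin with h0 | h1
        · exact h0
        · exact absurd ((hOI.visIff (x, y) hin).mp h1) hseen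
      have hcont : PySem.Set.contains stB.2.1 (x, y) = false := by
        rcases Bool.eq_false_or_eq_true (PySem.Set.contains stB.2.1 (x, y)) with ht | hf
        · exfalso
          apply hseen
          have := ht
          unfold PySem.Set.contains at this
          exact List.contains_iff_mem.mp this
        · exact hf
      rw [if_pos ⟨hfg, hvis0⟩, if_pos ⟨hfg, hcont⟩]
      -- shared abstract data
      set seed : Int × Int := (x, y) with hseed
      set V₀ : Int × Int → Prop := fun p => p ∈ stB.2.1 ∨ p = seed with hV0
      set L₀ : Int × Int → Int := fun p => stB.1.getD p 0 with hL0
      set cn : Int := stB.2.2 + 1 with hcn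
      have hcnA : stA.2.2 + 1 = cn := by rw [hOI.cntEq]
      have hseedV : V₀ seed := Or.inr rfl
      have hV0in : ∀ p, V₀ p → pvInR w h p := by
        rintro p (hp | rfl)
        · exact hOI.seenInR p hp
        · exact hin
      have hcl0 : ∀ p, V₀ p → p ≠ seed → ∀ n ∈ pvAdj p, pvGoodP image w h n → V₀ n := by
        rintro p (hp | rfl) hps n hnadj hgood
        · exact Or.inl (hOI.closedS p hp n hnadj hgood)
        · exact absurd rfl hps
      -- A-side initial invariant
      have hAtV : ∀ p, pvInR w h p → pvAt (pvSet2 stA.2.1 x y 1) p.1 p.2 =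
          if p.1 = x ∧ p.2 = y then 1 else pvAt stA.2.1 p.1 p.2 :=
        fun p hp => pvAt_set2 w h stA.2.1 x y 1 hOI.shV hin p.1 p.2 hp
      have hAtL : ∀ p, pvInR w h p → pvAt (pvSet2 stA.1 x y cn) p.1 p.2 =
          if p.1 = x ∧ p.2 = y then cn else pvAt stA.1 p.1 p.2 :=
        fun p hp => pvAt_set2 w h stA.1 x y cn hOI.shL hin p.1 p.2 hp
      have hpeq : ∀ p : Int × Int, (p.1 = x ∧ p.2 = y) ↔ p = seed := by
        intro p
        constructor
        · intro hc; exact Prod.ext hc.1 hc.2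
        · rintro rfl; exact ⟨rfl, rfl⟩
      have hmkV : ∀ p, pvInR w h p → (pvMk (pvSet2 stA.2.1 x y 1) p ↔ p = seed ∨ p ∈ stB.2.1) := by
        intro p hp
        unfold pvMk
        rw [hAtV p hp]
        constructor
        · intro hh
          by_cases hc : p.1 = x ∧ p.2 = y
          · exact Or.inl ((hpeq p).mp hc)
          · rw [if_neg hc] at hh
            exact Or.inr ((hOI.visIff p hp).mp hh)
        · rintro (rfl | hh)
          · simp [hseed]
          · split_ifs
            · rfl
            · exact (hOI.visIff p hp).mpr hh
      have hInvA : PvIA image w h cn V₀ seed L₀ (pvSet2 stA.1 x y cn)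
          (pvSet2 stA.2.1 x y 1) [seed] := {
        shL := pvShape_set2 w h stA.1 x y cn hOI.shL
        shV := pvShape_set2 w h stA.2.1 x y 1 hOI.shV
        binV := by
          intro p hp
          rw [hAtV p hp]
          split_ifs
          · right; rfl
          · exact hOI.binV p hp
        monoV := by
          intro p hV
          have hp := hV0in p hV
          rcases hV with hc | hc
          · exact (hmkV p hp).mpr (Or.inr hc)
          · exact (hmkV p hp).mpr (Or.inl hc)
        qmem := by
          intro p hp
          have hps : p = seed := by simpa using hp
          subst hps
          exact ⟨hin, (hmkV _ hin).mpr (Or.inl rfl)⟩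
        closedI := by
          intro p hpIn hmk hnotq n hnadj hgood
          have hpneseed : p ≠ seed := fun hc => hnotq (by simp [hc])
          have hpseen : p ∈ stB.2.1 := by
            rcases (hmkV p hpIn).mp hmk with hc | hc
            · exact absurd hc hpneseed
            · exact hc
          exact (hmkV n hgood.1).mpr (Or.inr (hOI.closedS p hpseen n hnadj hgood))
        reachI := by
          intro p hpIn hmk
          rcases (hmkV p hpIn).mp hmk with hc | hc
          · exact Or.inl (Or.inr hc)
          · exact Or.inl (Or.inl hc)
        lblI := by
          intro p hpIn
          rw [hAtL p hpIn]
          by_cases hps : p = seed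
          · rw [if_pos ((hpeq p).mpr hps), if_pos (Or.inr hps)]
          · rw [if_neg (fun hc => hps ((hpeq p).mp hc))]
            have hcond : ¬ ((pvMk (pvSet2 stA.2.1 x y 1) p ∧ ¬ V₀ p) ∨ p = seed) := by
              rintro (⟨hmk, hnV⟩ | hc)
              · rcases (hmkV p hpIn).mp hmk with hc | hc
                · exact hps hc
                · exact hnV (Or.inl hc)
              · exact hps hc
            rw [if_neg hcond]
            exact hOI.lblEq p hpIn }
      have hmeasA : ([seed] : List (Int × Int)).length + pvFresh (pvSet2 stA.2.1 x y 1) ≤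
          w.toNat * h.toNat + 1 := by
        have := pvFresh_le w h (pvSet2 stA.2.1 x y 1) (pvShape_set2 w h stA.2.1 x y 1 hOI.shV)
        simp only [List.length_singleton]
        omega
      obtain ⟨a1, a2, a3, a4, a5⟩ := pvBFSA_spec image w h cn V₀ seed L₀ hin hseedV hV0in hcl0
        (w.toNat * h.toNat + 1) (pvSet2 stA.1 x y cn) (pvSet2 stA.2.1 x y 1) [seed] hInvA hmeasA
      have haddB : PySem.Set.add stB.2.1 seed = stB.2.1 ++ [seed] := by
        unfold PySem.Set.add
        rw [hcont]
        simp
      have hInvB : PvIB image w h cn V₀ seed L₀ (stB.1.insert seed cn)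
          (stB.2.1 ++ [seed]) [seed] := {
        seenInR := by
          intro p hp
          rcases List.mem_append.mp hp with hp | hp
          · exact hOI.seenInR p hp
          · have hps : p = seed := by simpa using hp
            subst hps; exact hin
        monoV := by
          rintro p (hp | rfl)
          · exact List.mem_append.mpr (Or.inl hp)
          · exact List.mem_append.mpr (Or.inr (by simp))
        smem := by
          intro p hp
          have hps : p = seed := by simpa using hp
          subst hps
          exact List.mem_append.mpr (Or.inr (by simp))
        closedI := by
          intro p hp hnotq n hnadj hgood
          have hpneseed : p ≠ seed := fun hc => hnotq (by simp [hc])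
          have hpseen : p ∈ stB.2.1 := by
            rcases List.mem_append.mp hp with hc | hc
            · exact hc
            · exact absurd (by simpa using hc) hpneseed
          exact List.mem_append.mpr (Or.inl (hOI.closedS p hpseen n hnadj hgood))
        reachI := by
          intro p hp
          rcases List.mem_append.mp hp with hc | hc
          · exact Or.inl (Or.inl hc)
          · exact Or.inl (Or.inr (by simpa using hc))
        lblI := by
          intro p
          rw [PySem.Dict.getD_insert]
          by_cases hps : p = seed
          · rw [if_pos hps, if_pos (Or.inr hps)]
          · rw [if_neg hps]
            have hcond : ¬ ((p ∈ stB.2.1 ++ [seed] ∧ ¬ V₀ p) ∨ p = seed) := by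
              rintro (⟨hmem, hnV⟩ | hc)
              · rcases List.mem_append.mp hmem with hc | hc
                · exact hnV (Or.inl hc)
                · exact hps (by simpa using hc)
              · exact hps hc
            rw [if_neg hcond] }
      have hmeasB : ([seed] : List (Int × Int)).length + pvSeenCnt w h (stB.2.1 ++ [seed]) ≤
          w.toNat * h.toNat + 1 := by
        have := pvSeenCnt_le w h (stB.2.1 ++ [seed])
        simp only [List.length_singleton]
        omega
      obtain ⟨b1, b2, b3⟩ := pvDFSB_spec image w h cn V₀ seed L₀ hin hseedV hV0in hcl0
        (w.toNat * h.toNat + 1) (stB.1.insert seed cn) (stB.2.1 ++ [seed]) [seed] hInvB hmeasB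
      rw [hcnA, haddB]
      exact {
        shL := a1
        shV := a2
        binV := a3
        cntEq := rfl
        visIff := fun p hp => (a4 p hp).trans (b2 p).symm
        lblEq := by
          intro p hp
          rw [a5 p hp, b3 p]
          have hiff := (a4 p hp).trans (b2 p).symm
          refine if_congr ?_ rfl rfl
          constructor
          · rintro (⟨hmk, hnV⟩ | hc)
            · exact Or.inl ⟨hiff.mp hmk, hnV⟩
            · exact Or.inr hc
          · rintro (⟨hmem, hnV⟩ | hc)
            · exact Or.inl ⟨hiff.mpr hmem, hnV⟩
            · exact Or.inr hc
        seenInR := b1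
        closedS := by
          intro p hp n hnadj hgood
          by_cases hVn : V₀ n
          · exact (b2 n).mpr (Or.inl hVn)
          · rcases (b2 p).mp hp with hV | hR
            · rcases hV with hseenp | hps
              · exact absurd (Or.inl (hOI.closedS p hseenp n hnadj hgood)) hVn
              · subst hps
                exact (b2 n).mpr (Or.inr (PvReach.step (PvReach.refl seed) hnadj hgood hVn))
            · exact (b2 n).mpr (Or.inr (PvReach.step hR hnadj hgood hVn)) }
  · have hA : ¬ (pvAt image x y = 1 ∧ pvAt stA.2.1 x y = 0) := fun hc => hfg hc.1
    have hB : ¬ (pvAt image x y = 1 ∧ PySem.Set.contains stB.2.1 (x, y) = false) := fun hc => hfg hc.1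
    rw [if_neg hA, if_neg hB]
    exact hOI

-- fold two lists in parallel through a relation
theorem pvFoldl_pair {γ α β : Type} (R : α → β → Prop) (f : α → γ → α) (g : β → γ → β) :
    ∀ (cs : List γ) (a : α) (b : β),
    (∀ c ∈ cs, ∀ a b, R a b → R (f a c) (g b c)) → R a b →
    R (cs.foldl f a) (cs.foldl g b) := by
  intro cs
  induction cs with
  | nil => intro a b _ hR; exact hR
  | cons c cs ih =>
    intro a b hstep hR
    exact ih _ _ (fun c' hc' => hstep c' (by simp [hc'])) (hstep c (by simp) a b hR)

-- a joint-invariant pair of states yields equal outputs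
theorem pvFinal (image : List (List Int)) (w hgt : Int) (hw0 : 0 ≤ w) (hh0 : 0 ≤ hgt)
    (stA : List (List Int) × List (List Int) × Int)
    (stB : PySem.Dict (Int × Int) Int × PySem.Set (Int × Int) × Int)
    (hOI : PvOI image w hgt stA stB) :
    stA.1 = (PySem.List.pyRange 0 w 1).map (fun x =>
      (PySem.List.pyRange 0 hgt 1).map (fun y => stB.1.getD (x, y) 0)) := by
  apply List.ext_getElem
  · rw [hOI.shL.1, List.length_map, PySem.List.length_pyRange_one]
    norm_num
  · intro i h1 h2
    simp only [List.getElem_map]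
    rw [PySem.List.getElem_pyRange_one, zero_add]
    have hiw : i < w.toNat := by rw [← hOI.shL.1]; exact h1
    apply List.ext_getElem
    · rw [List.length_map, PySem.List.length_pyRange_one,
        hOI.shL.2 i (by rwa [hOI.shL.1]) (by rwa [hOI.shL.1])]
      norm_num
    · intro j hj1 hj2
      simp only [List.getElem_map]
      rw [PySem.List.getElem_pyRange_one, zero_add]
      have hjh : j < hgt.toNat := by
        have := hOI.shL.2 i (by rwa [hOI.shL.1]) (by rwa [hOI.shL.1])
        omega
      have hinR : pvInR w hgt ((i : Int), (j : Int)) := by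
        simp only [pvInR]
        omega
      have hlbl := hOI.lblEq ((i : Int), (j : Int)) hinR
      rw [pvAt_natCast stA.1 i j (by rwa [hOI.shL.1])] at hlbl
      rw [List.getD_eq_getElem _ _ hj1] at hlbl
      exact hlbl

-- entries of the all-zero grid
theorem pvInit0 (w hgt : Int) (p : Int × Int) (hp1 : 0 ≤ p.1) (hp2 : 0 ≤ p.2) :
    pvAt (List.replicate w.toNat (List.replicate hgt.toNat (0 : Int))) p.1 p.2 = 0 := by
  rw [pvAt_nn _ _ _ hp1 hp2]
  simp only [List.getD_eq_getElem?_getD, List.getElem?_replicate]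
  split_ifs <;> simp [List.getD_eq_getElem?_getD, List.getElem?_replicate]
  split_ifs <;> simp

theorem pvMain (image : List (List Int)) :
    label_components image = label_components_alt image := by
  simp only [label_components, label_components_alt]
  refine pvFinal image _ _ ?w0 ?h0 _ _ (pvFoldl_pair _ _ _ _ _ _ ?step ?init)
  case w0 => exact Int.natCast_nonneg _
  case h0 => exact Int.natCast_nonneg _
  case step =>
    intro x hx a b hab
    obtain ⟨hx0, hxw⟩ := PySem.List.mem_pyRange_one.mp hx
    exact pvFoldl_pair _ _ _ _ a b
      (fun y hy a' b' hab' =>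
        pvBody_step image _ _ x y hx0 hxw
          (PySem.List.mem_pyRange_one.mp hy).1 (PySem.List.mem_pyRange_one.mp hy).2
          a' b' hab') hab
  case init =>
    refine {
      shL := ⟨by simp, fun i hi hi' => by simp⟩
      shV := ⟨by simp, fun i hi hi' => by simp⟩
      binV := fun p hp => Or.inl (pvInit0 _ _ p hp.1 hp.2.2.1)
      cntEq := rfl
      visIff := by
        intro p hp
        rw [pvMk, pvInit0 _ _ p hp.1 hp.2.2.1]
        simp [PySem.Set.empty]
      lblEq := by
        intro p hp
        rw [pvInit0 _ _ p hp.1 hp.2.2.1, PySem.Dict.getD_empty]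
      seenInR := by
        intro p hp
        simp [PySem.Set.empty] at hp
      closedS := by
        intro p hp
        simp [PySem.Set.empty] at hp }

-- ===== VERDICT (by name: the statement is the Claim_ definition above) =====
theorem label_components_spec : Claim_equal_label_components := by
  intro image hdom hpre
  exact pvMain image
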